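-- pv_equiv track=rewrite | github.com/algoritmos-e-estrutura-de-dados/lab05-troca-figurinhas-MatheusTHg | main.py | trocaFigurinha
-- ===== SOURCE A (Python) =====
-- def trocaFigurinha(figurinhaPaulo, figurinhaHenrique):
--
--   indice = 0
--   qntd = 0
--
--   if len(figurinhaPaulo) < len(figurinhaHenrique):
--     for i in range(len(figurinhaPaulo)):
--       for j in range(len(figurinhaHenrique)):
--         if figurinhaPaulo[i] == figurinhaHenrique[j]:
--           indice += 1
--     qntd = len(figurinhaPaulo) - indice
--
--   elif len(figurinhaHenrique) < len(figurinhaPaulo):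
--     for i in range(len(figurinhaHenrique)):
--       for j in range(len(figurinhaPaulo)):
--         if figurinhaHenrique[i] == figurinhaPaulo[j]:
--           indice += 1
--     qntd = len(figurinhaHenrique) - indice
--
--   else:
--     for i in range(len(figurinhaPaulo)):
--       for j in range(len(figurinhaHenrique)):
--         if figurinhaPaulo[i] == figurinhaHenrique[j]:
--           indice += 1
--     qntd = len(figurinhaPaulo) - indice
--
--   return qntd
-- ===== SOURCE B (Python) =====
-- def trocaFigurinha(figurinhaPaulo, figurinhaHenrique):
--     counts = {}
--     for x in figurinhaPaulo:
--         counts[x] = counts.get(x, 0) + 1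
--     pares = 0
--     for y in figurinhaHenrique:
--         pares += counts.get(y, 0)
--     return min(len(figurinhaPaulo), len(figurinhaHenrique)) - pares
-- ===== Notes on version B (the rewrite author's own statement) =====
-- stated objective: faster
-- what changed: Replaces the nested O(n*m) equality loops with a one-pass hash counter over one list and a single lookup pass over the other, computing the same cross-pair count as sum of count products.
import Mathlib
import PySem

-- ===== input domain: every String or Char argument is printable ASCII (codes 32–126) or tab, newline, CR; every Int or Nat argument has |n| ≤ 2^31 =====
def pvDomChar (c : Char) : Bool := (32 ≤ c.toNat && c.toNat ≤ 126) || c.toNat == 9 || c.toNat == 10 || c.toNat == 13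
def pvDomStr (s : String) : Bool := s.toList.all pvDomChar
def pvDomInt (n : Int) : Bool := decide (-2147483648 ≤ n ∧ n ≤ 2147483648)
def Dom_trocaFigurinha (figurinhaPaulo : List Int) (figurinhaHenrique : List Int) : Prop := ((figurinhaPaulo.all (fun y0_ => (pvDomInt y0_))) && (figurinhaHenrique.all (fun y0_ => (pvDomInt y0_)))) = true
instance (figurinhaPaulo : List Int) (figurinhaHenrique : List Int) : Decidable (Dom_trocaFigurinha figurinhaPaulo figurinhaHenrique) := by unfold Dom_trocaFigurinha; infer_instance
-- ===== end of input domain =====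

-- B replaces A's nested O(n*m) equality loops by a one-pass hash counter plus a lookup pass (faster).

-- ===== PORT A =====
-- A's inner 'for j in range(len(ys)): if x == ys[j]: indice += 1' over full index ranges,
-- as a fold over the list itself.
def pvCross (xs ys : List Int) : Int :=
  xs.foldl (fun acc x => ys.foldl (fun a y => if x == y then a + 1 else a) acc) 0

def trocaFigurinha (figurinhaPaulo : List Int) (figurinhaHenrique : List Int) : Int :=
  if figurinhaPaulo.length < figurinhaHenrique.length then
    (figurinhaPaulo.length : Int) - pvCross figurinhaPaulo figurinhaHenrique
  else if figurinhaHenrique.length < figurinhaPaulo.length then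
    (figurinhaHenrique.length : Int) - pvCross figurinhaHenrique figurinhaPaulo
  else
    (figurinhaPaulo.length : Int) - pvCross figurinhaPaulo figurinhaHenrique

-- ===== PORT B =====
def trocaFigurinha_alt (figurinhaPaulo : List Int) (figurinhaHenrique : List Int) : Int :=
  let counts : PySem.Dict Int Int :=
    figurinhaPaulo.foldl (fun d x => d.insert x (d.getD x 0 + 1)) PySem.Dict.empty
  let pares : Int := figurinhaHenrique.foldl (fun a y => a + counts.getD y 0) 0
  (min figurinhaPaulo.length figurinhaHenrique.length : Int) - pares

-- ===== PRECONDITION & SPEC =====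
def Spec_trocaFigurinha (figurinhaPaulo : List Int) (figurinhaHenrique : List Int) (out : Int) : Prop := out = trocaFigurinha_alt figurinhaPaulo figurinhaHenrique
instance (figurinhaPaulo : List Int) (figurinhaHenrique : List Int) (out : Int) : Decidable (Spec_trocaFigurinha figurinhaPaulo figurinhaHenrique out) := by unfold Spec_trocaFigurinha; infer_instance

-- ===== CLAIM (what is proved, stated in full; the proofs are below) =====
def Claim_equal_trocaFigurinha : Prop := ∀ (figurinhaPaulo : List Int) (figurinhaHenrique : List Int), Dom_trocaFigurinha figurinhaPaulo figurinhaHenrique → Spec_trocaFigurinha figurinhaPaulo figurinhaHenrique (trocaFigurinha figurinhaPaulo figurinhaHenrique)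

-- ===== LEMMAS AND PROOFS =====

-- A's inner loop counts occurrences of x in ys.
theorem pvInner_eq (x : Int) (ys : List Int) (a : Int) :
    ys.foldl (fun a y => if x == y then a + 1 else a) a = a + (ys.count x : Int) := by
  induction ys generalizing a with
  | nil => simp
  | cons y t ih =>
      simp only [List.foldl_cons, ih, List.count_cons]
      by_cases hxy : x = y
      · simp [hxy]
        omega
      · have hyx : ¬ (y = x) := fun h => hxy h.symm
        simp [hxy, hyx]

theorem pvCross_eq (xs ys : List Int) :
    pvCross xs ys = (xs.map (fun x => (ys.count x : Int))).sum := by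
  unfold pvCross
  have h1 : xs.foldl (fun acc x => ys.foldl (fun a y => if x == y then a + 1 else a) acc) 0
      = xs.foldl (fun acc x => acc + (ys.count x : Int)) 0 := by
    apply PySem.List.foldl_congr_mem
    intro a x _; exact pvInner_eq x ys a
  rw [h1, PySem.List.foldl_add]
  simp

-- double counting: summing ys-counts over xs = summing xs-counts over ys
theorem pvCross_symm (xs ys : List Int) :
    (xs.map (fun x => (ys.count x : Int))).sum = (ys.map (fun y => (xs.count y : Int))).sum := by
  induction xs with
  | nil => simp
  | cons x t ih =>
      simp only [List.map_cons, List.sum_cons, ih]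
      have h1 : (ys.map (fun y => ((x :: t).count y : Int))).sum
          = (ys.map (fun y => (if y == x then (1:Int) else 0) + (t.count y : Int))).sum := by
        congr 1
        apply List.map_congr_left
        intro y _
        simp only [List.count_cons]
        by_cases hyx : y = x
        · simp [hyx]
          omega
        · have hxy : ¬ (x = y) := fun hc => hyx hc.symm
          simp [hyx, hxy]
      rw [h1, PySem.List.sum_map_add_int, PySem.List.sum_map_ite_one_zero]
      simp [List.count]

-- B's counting dict is Counter(xs), and its lookup pass sums xs-counts over ys.
theorem pvAlt_eq (xs ys : List Int) :
    trocaFigurinha_alt xs ys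
      = (min xs.length ys.length : Int) - (ys.map (fun y => (xs.count y : Int))).sum := by
  unfold trocaFigurinha_alt
  simp only []
  rw [PySem.Dict.foldl_insert_getD_add_one_eq_counter]
  rw [PySem.List.foldl_add (g := fun y => (PySem.Dict.counter xs).getD y 0)]
  simp [PySem.Dict.getD_counter]

-- ===== VERDICT (by name: the statement is the Claim_ definition above) =====
theorem trocaFigurinha_spec : Claim_equal_trocaFigurinha := by
  intro p h _
  show trocaFigurinha p h = trocaFigurinha_alt p h
  rw [pvAlt_eq]
  unfold trocaFigurinha
  split_ifs with h1 h2
  · rw [pvCross_eq, pvCross_symm,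
      min_eq_left (by exact_mod_cast Nat.le_of_lt h1 : (p.length : Int) ≤ (h.length : Int))]
  · rw [pvCross_eq,
      min_eq_right (by exact_mod_cast Nat.le_of_lt h2 : (h.length : Int) ≤ (p.length : Int))]
  · rw [pvCross_eq, pvCross_symm,
      min_eq_left (by exact_mod_cast Nat.le_of_not_lt h2 : (p.length : Int) ≤ (h.length : Int))]
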